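-- pv_equiv track=rewrite | github.com/goracle/dirichlet-divisor-conjecture | gauss_circle_conjecture/b1prec.py | b1_sqrt
-- ===== SOURCE A (Python) =====
-- def C(x):
--     if x <= 0:
--         return 0
--     return (x + 3) // 4 - (x + 1) // 4
--
-- def W(x):
--     if x <= 0:
--         return 0
--     q, r = divmod(x, 4)
--     total = q * (-2)
--     if r >= 1:
--         total += (4 * q + 1)
--     if r >= 3:
--         total -= (4 * q + 3)
--     return total
--
-- def b1_sqrt(N):
--     if N <= 1:
--         return 0
--     P = N - 1
--     total = 0
--     d = 1
--     while d <= P: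
--         v = P // d
--         d_hi = P // v
--         block_C = C(d_hi) - C(d - 1)
--         block_W = W(d_hi) - W(d - 1)
--         total += N * v * block_C - (v * (v + 1) // 2) * block_W
--         d = d_hi + 1
--     return 4 * total
-- ===== SOURCE B (Python) =====
-- def C(x):
--     if x <= 0:
--         return 0
--     return (x + 3) // 4 - (x + 1) // 4
--
-- def W(x):
--     if x <= 0:
--         return 0
--     q, r = divmod(x, 4)
--     total = q * (-2)
--     if r >= 1:
--         total += (4 * q + 1)
--     if r >= 3:
--         total -= (4 * q + 3)
--     return total
--
-- def b1_sqrt(N):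
--     if N <= 1:
--         return 0
--     P = N - 1
--     s = 1
--     while (s + 1) * (s + 1) <= P:
--         s += 1
--     total = 0
--     for d in range(1, s + 1):
--         v = P // d
--         total += (C(d) - C(d - 1)) * (N * v - d * (v * (v + 1) // 2))
--     for m in range(1, s + 1):
--         u = P // m
--         total += N * C(u) - m * W(u)
--     total -= N * s * C(s) - (s * (s + 1) // 2) * W(s)
--     return 4 * total
-- ===== Notes on version B (the rewrite author's own statement) =====
-- stated objective: alternative
-- what changed: Replaces A's divisor-block jumping loop (d_hi = P//(P//d) with C/W block differences) by the Dirichlet hyperbola method: split at s = isqrt(P) into a row loop over d=1..s, a column loop over m=1..s, and a closed-form cross term.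
import Mathlib
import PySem

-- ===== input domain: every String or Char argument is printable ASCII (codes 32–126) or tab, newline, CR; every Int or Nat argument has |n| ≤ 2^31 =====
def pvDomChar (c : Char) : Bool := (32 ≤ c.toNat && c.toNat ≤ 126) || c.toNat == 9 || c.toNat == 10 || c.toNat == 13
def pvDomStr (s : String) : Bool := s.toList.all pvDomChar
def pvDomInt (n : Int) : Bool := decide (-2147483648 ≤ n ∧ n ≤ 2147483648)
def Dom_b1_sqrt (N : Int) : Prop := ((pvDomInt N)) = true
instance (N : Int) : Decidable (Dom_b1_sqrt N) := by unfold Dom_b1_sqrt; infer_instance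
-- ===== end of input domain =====

-- B replaces A's divisor-block jumping (d_hi = P//(P//d)) by the Dirichlet hyperbola split
-- at s = isqrt(P): two plain loops over 1..s plus a cross term; a different algorithm of
-- similar cost.

-- ===== PORT A =====
-- helper C(x)
def Cfun (x : Int) : Int :=
  if x ≤ 0 then 0
  else PySem.Int.floordiv (x + 3) 4 - PySem.Int.floordiv (x + 1) 4

-- helper W(x); divmod(x,4) ported via PySem.Int.floordiv / mod
def Wfun (x : Int) : Int :=
  if x ≤ 0 then 0
  else
    let q := PySem.Int.floordiv x 4
    let r := PySem.Int.mod x 4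
    let total := q * (-2)
    let total := if 1 ≤ r then total + (4 * q + 1) else total
    let total := if 3 ≤ r then total - (4 * q + 3) else total
    total

-- A's while loop, with fuel to make it total (fuel is always sufficient at the call site)
def b1Loop (N P : Int) : Nat → Int → Int → Int
  | 0, total, _ => total
  | fuel + 1, total, d =>
    if d ≤ P then
      let v := PySem.Int.floordiv P d
      let dhi := PySem.Int.floordiv P v
      let blockC := Cfun dhi - Cfun (d - 1)
      let blockW := Wfun dhi - Wfun (d - 1)
      b1Loop N P fuel
        (total + (N * v * blockC - PySem.Int.floordiv (v * (v + 1)) 2 * blockW))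
        (dhi + 1)
    else total

def b1_sqrt (N : Int) : Int :=
  if N ≤ 1 then 0
  else
    let P := N - 1
    4 * b1Loop N P (P.toNat + 1) 0 1

-- ===== PORT B =====
-- B's integer-sqrt loop 'while (s+1)*(s+1) <= P: s += 1', with fuel (always sufficient at the call site)
def isqrtLoop (P : Int) : Nat → Int → Int
  | 0, s => s
  | fuel + 1, s => if (s + 1) * (s + 1) ≤ P then isqrtLoop P fuel (s + 1) else s

-- body of B's first loop (over d = 1..s)
def b1TermD (N P d : Int) : Int :=
  let v := PySem.Int.floordiv P d
  (Cfun d - Cfun (d - 1)) * (N * v - d * PySem.Int.floordiv (v * (v + 1)) 2)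

-- body of B's second loop (over m = 1..s)
def b1TermM (N P m : Int) : Int :=
  let u := PySem.Int.floordiv P m
  N * Cfun u - m * Wfun u

def b1_sqrt_alt (N : Int) : Int :=
  if N ≤ 1 then 0
  else
    let P := N - 1
    let s := isqrtLoop P P.toNat 1
    let total := (PySem.List.pyRange 1 (s + 1) 1).foldl (fun t d => t + b1TermD N P d) 0
    let total := (PySem.List.pyRange 1 (s + 1) 1).foldl (fun t m => t + b1TermM N P m) total
    let total := total - (N * s * Cfun s - PySem.Int.floordiv (s * (s + 1)) 2 * Wfun s)
    4 * total

-- ===== PRECONDITION & SPEC =====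
def Spec_b1_sqrt (N : Int) (out : Int) : Prop := out = b1_sqrt_alt N
instance (N : Int) (out : Int) : Decidable (Spec_b1_sqrt N out) := by unfold Spec_b1_sqrt; infer_instance

-- ===== CLAIM (what is proved, stated in full; the proofs are below) =====
def Claim_equal_b1_sqrt : Prop := ∀ (N : Int), Dom_b1_sqrt N → Spec_b1_sqrt N (b1_sqrt N)

-- ===== LEMMAS AND PROOFS =====

-- abbreviations used only by the proofs
def chi (d : Int) : Int := Cfun d - Cfun (d - 1)
def Tv (v : Int) : Int := PySem.Int.floordiv (v * (v + 1)) 2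
def gfun (N : Int) (p : Int × Int) : Int := chi p.1 * (N - p.1 * p.2)

-- ---- generic sum plumbing ----

theorem IccSuccRight (a b : Int) (h : a ≤ b + 1) :
    Finset.Icc a (b + 1) = insert (b + 1) (Finset.Icc a b) := by
  ext x
  simp only [Finset.mem_Icc, Finset.mem_insert]
  omega

theorem sumIccSucc (f : Int → Int) (a b : Int) (h : a ≤ b + 1) :
    (∑ x ∈ Finset.Icc a (b + 1), f x) = (∑ x ∈ Finset.Icc a b, f x) + f (b + 1) := by
  rw [IccSuccRight a b h, Finset.sum_insert (by simp)]
  ring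

theorem pyRangeSumIcc (f : Int → Int) :
    ∀ (n : Nat) (a b : Int), b + 1 - a = (n : Int) → a ≤ b + 1 →
    ((PySem.List.pyRange a (b + 1) 1).map f).sum = ∑ x ∈ Finset.Icc a b, f x := by
  intro n
  induction n with
  | zero =>
    intro a b hn _
    rw [PySem.List.pyRange_one_eq_nil (by omega), Finset.Icc_eq_empty (by omega)]
    simp
  | succ m ih =>
    intro a b hn hab
    have hab' : a ≤ b := by omega
    rw [PySem.List.pyRange_one_succ_right hab', List.map_append, List.sum_append]
    have hb : b = (b - 1) + 1 := by ring
    rw [hb] at hab' ⊢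
    rw [ih a (b - 1) (by omega) (by omega), sumIccSucc f a (b - 1) (by omega)]
    simp

theorem sumIccOne (v : Int) (hv : 0 ≤ v) : (∑ _x ∈ Finset.Icc 1 v, (1 : Int)) = v := by
  simp [Int.card_Icc]
  omega

theorem gaussAux : ∀ (n : Nat) (v : Int), v = (n : Int) →
    2 * (∑ m ∈ Finset.Icc 1 v, m) = v * (v + 1) := by
  intro n
  induction n with
  | zero =>
    intro v hv
    have hv0 : v = 0 := by omega
    subst hv0
    rw [Finset.Icc_eq_empty (by omega)]
    simp
  | succ k ih =>
    intro v hv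
    have h1 : v = (v - 1) + 1 := by ring
    rw [h1, sumIccSucc (fun x => x) 1 (v - 1) (by omega)]
    have := ih (v - 1) (by omega)
    ring_nf
    ring_nf at this
    omega

theorem gaussIcc (v : Int) (hv : 0 ≤ v) : (∑ m ∈ Finset.Icc 1 v, m) = Tv v := by
  have h2 := gaussAux v.toNat v (by omega)
  unfold Tv
  rw [eq_comm, PySem.Int.floordiv_eq_iff_of_pos (by norm_num)]
  omega

theorem teleIcc (f : Int → Int) (h0 : f 0 = 0) :
    ∀ (n : Nat) (x : Int), x = (n : Int) →
    (∑ d ∈ Finset.Icc 1 x, (f d - f (d - 1))) = f x := by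
  intro n
  induction n with
  | zero =>
    intro x hx
    have hx0 : x = 0 := by omega
    subst hx0
    rw [Finset.Icc_eq_empty (by omega)]
    simp [h0]
  | succ k ih =>
    intro x hx
    have h1 : x = (x - 1) + 1 := by ring
    rw [h1, sumIccSucc (fun d => f d - f (d - 1)) 1 (x - 1) (by omega),
      ih (x - 1) (by omega)]
    ring_nf

-- ---- arithmetic facts about C and W ----

theorem Cfun_zero : Cfun 0 = 0 := by simp [Cfun]

theorem Wfun_zero : Wfun 0 = 0 := by simp [Wfun]

theorem chi_const (d : Int) (hd : 1 ≤ d) :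
    (d % 4 = 0 → chi d = 0) ∧ (d % 4 = 1 → chi d = 1) ∧
    (d % 4 = 2 → chi d = 0) ∧ (d % 4 = 3 → chi d = -1) := by
  unfold chi Cfun
  simp only [PySem.Int.floordiv_eq_ediv_of_pos (show (0:Int) < 4 by norm_num)]
  refine ⟨?_, ?_, ?_, ?_⟩ <;> intro h <;> split_ifs <;> omega

-- W's increment is d·chi(d)
theorem Wdiff (d : Int) (hd : 1 ≤ d) : Wfun d - Wfun (d - 1) = d * chi d := by
  have hr : d % 4 = 0 ∨ d % 4 = 1 ∨ d % 4 = 2 ∨ d % 4 = 3 := by omega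
  obtain ⟨h0, h1, h2, h3⟩ := chi_const d hd
  have hW : ∀ c : Int, chi d = c → Wfun d - Wfun (d - 1) = d * c → Wfun d - Wfun (d - 1) = d * chi d := by
    intro c hc he; rw [hc]; exact he
  rcases hr with h | h | h | h
  · refine hW 0 (h0 h) ?_
    unfold Wfun
    simp only [PySem.Int.floordiv_eq_ediv_of_pos (show (0:Int) < 4 by norm_num),
      PySem.Int.mod_eq_emod_of_pos (show (0:Int) < 4 by norm_num)]
    split_ifs <;> omega
  · refine hW 1 (h1 h) ?_
    unfold Wfun
    simp only [PySem.Int.floordiv_eq_ediv_of_pos (show (0:Int) < 4 by norm_num),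
      PySem.Int.mod_eq_emod_of_pos (show (0:Int) < 4 by norm_num)]
    split_ifs <;> omega
  · refine hW 0 (h2 h) ?_
    unfold Wfun
    simp only [PySem.Int.floordiv_eq_ediv_of_pos (show (0:Int) < 4 by norm_num),
      PySem.Int.mod_eq_emod_of_pos (show (0:Int) < 4 by norm_num)]
    split_ifs <;> omega
  · refine hW (-1) (h3 h) ?_
    unfold Wfun
    simp only [PySem.Int.floordiv_eq_ediv_of_pos (show (0:Int) < 4 by norm_num),
      PySem.Int.mod_eq_emod_of_pos (show (0:Int) < 4 by norm_num)]
    split_ifs <;> omega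

-- ---- closed inner sums ----

-- row: sum over m ≤ v of chi(d)·(N − d·m)
theorem innerBlock (N d v : Int) (hv : 0 ≤ v) :
    (∑ m ∈ Finset.Icc 1 v, gfun N (d, m)) = chi d * (N * v - d * Tv v) := by
  unfold gfun
  have hpt : ∀ m : Int, chi d * (N - d * m) = (chi d * N) * 1 - (chi d * d) * m := by
    intro m; ring
  calc (∑ m ∈ Finset.Icc 1 v, chi d * (N - d * m))
      = ∑ m ∈ Finset.Icc 1 v, ((chi d * N) * 1 - (chi d * d) * m) := by
        exact Finset.sum_congr rfl (fun m _ => hpt m)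
    _ = (chi d * N) * (∑ _m ∈ Finset.Icc 1 v, (1 : Int)) -
        (chi d * d) * (∑ m ∈ Finset.Icc 1 v, m) := by
        rw [Finset.sum_sub_distrib, Finset.mul_sum, Finset.mul_sum]
    _ = chi d * (N * v - d * Tv v) := by
        rw [sumIccOne v hv, gaussIcc v hv]; ring

-- column: sum over d ≤ u of chi(d)·(K − d·M)
theorem colBlock (K M u : Int) (hu : 0 ≤ u) :
    (∑ d ∈ Finset.Icc 1 u, chi d * (K - d * M)) = K * Cfun u - M * Wfun u := by
  have hpt : ∀ d ∈ Finset.Icc 1 u, chi d * (K - d * M) =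
      K * (Cfun d - Cfun (d - 1)) - M * (Wfun d - Wfun (d - 1)) := by
    intro d hd
    rw [Finset.mem_Icc] at hd
    rw [Wdiff d hd.1]
    unfold chi
    ring
  calc (∑ d ∈ Finset.Icc 1 u, chi d * (K - d * M))
      = ∑ d ∈ Finset.Icc 1 u,
          (K * (Cfun d - Cfun (d - 1)) - M * (Wfun d - Wfun (d - 1))) :=
        Finset.sum_congr rfl hpt
    _ = K * (∑ d ∈ Finset.Icc 1 u, (Cfun d - Cfun (d - 1))) -
        M * (∑ d ∈ Finset.Icc 1 u, (Wfun d - Wfun (d - 1))) := by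
        rw [Finset.sum_sub_distrib, Finset.mul_sum, Finset.mul_sum]
    _ = K * Cfun u - M * Wfun u := by
        rw [teleIcc Cfun Cfun_zero u.toNat u (by omega),
          teleIcc Wfun Wfun_zero u.toNat u (by omega)]

-- ---- filters on the hyperbola region ----

theorem fdNonneg (P c : Int) (hc : 0 < c) (hP : 0 ≤ P) : 0 ≤ PySem.Int.floordiv P c := by
  rw [PySem.Int.le_floordiv_iff_mul_le hc]; omega

theorem fdLe (P c : Int) (hc : 1 ≤ c) (hP : 0 ≤ P) : PySem.Int.floordiv P c ≤ P := by
  have h1 : PySem.Int.floordiv P c < P + 1 := by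
    rw [PySem.Int.floordiv_lt_iff_lt_mul (by omega)]
    nlinarith
  omega

theorem filterIcc (P c : Int) (hc : 1 ≤ c) (hP : 0 ≤ P) :
    (Finset.Icc 1 P).filter (fun x => c * x ≤ P) = Finset.Icc 1 (PySem.Int.floordiv P c) := by
  have hfd := fdLe P c hc hP
  ext x
  simp only [Finset.mem_filter, Finset.mem_Icc]
  constructor
  · rintro ⟨⟨h1, _⟩, h3⟩
    refine ⟨h1, ?_⟩
    rw [PySem.Int.le_floordiv_iff_mul_le (by omega)]
    linarith [mul_comm c x]
  · rintro ⟨h1, h2⟩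
    have h3 : x * c ≤ P := by
      rw [← PySem.Int.le_floordiv_iff_mul_le (show (0:Int) < c by omega)]
      exact h2
    exact ⟨⟨h1, by omega⟩, by linarith [mul_comm x c]⟩

-- rows d = 1..s' of the hyperbola region
theorem rowSum (N P s' : Int) (_hs : 0 ≤ s') (_hsP : s' ≤ P) (hP : 0 ≤ P) :
    (∑ p ∈ (Finset.Icc 1 s' ×ˢ Finset.Icc 1 P).filter (fun p => p.1 * p.2 ≤ P), gfun N p) =
      ∑ d ∈ Finset.Icc 1 s',
        chi d * (N * PySem.Int.floordiv P d - d * Tv (PySem.Int.floordiv P d)) := by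
  rw [Finset.sum_filter, Finset.sum_product]
  refine Finset.sum_congr rfl ?_
  intro d hd
  rw [Finset.mem_Icc] at hd
  rw [← Finset.sum_filter, filterIcc P d hd.1 hP]
  exact innerBlock N d _ (fdNonneg P d (by omega) hP)

-- columns m = 1..s' of the hyperbola region
theorem colSum (N P s' : Int) (_hs : 0 ≤ s') (_hsP : s' ≤ P) (hP : 0 ≤ P) :
    (∑ p ∈ (Finset.Icc 1 P ×ˢ Finset.Icc 1 s').filter (fun p => p.1 * p.2 ≤ P), gfun N p) =
      ∑ m ∈ Finset.Icc 1 s',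
        (N * Cfun (PySem.Int.floordiv P m) - m * Wfun (PySem.Int.floordiv P m)) := by
  rw [Finset.sum_filter, Finset.sum_product, Finset.sum_comm]
  refine Finset.sum_congr rfl ?_
  intro m hm
  rw [Finset.mem_Icc] at hm
  have hfe : ((Finset.Icc 1 P).filter (fun d => d * m ≤ P)) =
      ((Finset.Icc 1 P).filter (fun d => m * d ≤ P)) := by
    apply Finset.filter_congr
    intro d _
    rw [mul_comm]
  rw [← Finset.sum_filter, hfe, filterIcc P m hm.1 hP]
  have hu : 0 ≤ PySem.Int.floordiv P m := fdNonneg P m (by omega) hP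
  have := colBlock N m (PySem.Int.floordiv P m) hu
  simpa [gfun] using this

-- ---- the hyperbola split ----

theorem hyperbola (N P s : Int) (hs1 : 1 ≤ s) (hs2 : s * s ≤ P) (hs3 : P < (s + 1) * (s + 1)) :
    (∑ p ∈ (Finset.Icc 1 P ×ˢ Finset.Icc 1 P).filter (fun p => p.1 * p.2 ≤ P), gfun N p) =
      (∑ p ∈ (Finset.Icc 1 s ×ˢ Finset.Icc 1 P).filter (fun p => p.1 * p.2 ≤ P), gfun N p) +
      (∑ p ∈ (Finset.Icc 1 P ×ˢ Finset.Icc 1 s).filter (fun p => p.1 * p.2 ≤ P), gfun N p) -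
      (∑ p ∈ Finset.Icc 1 s ×ˢ Finset.Icc 1 s, gfun N p) := by
  have hsP : s ≤ P := by nlinarith
  have e1 : ((Finset.Icc 1 P ×ˢ Finset.Icc 1 P).filter (fun p => p.1 * p.2 ≤ P)).filter (fun p => p.1 ≤ s) =
      (Finset.Icc 1 s ×ˢ Finset.Icc 1 P).filter (fun p => p.1 * p.2 ≤ P) := by
    ext ⟨d, m⟩
    simp only [Finset.filter_filter, Finset.mem_filter, Finset.mem_product, Finset.mem_Icc]
    constructor
    · rintro ⟨⟨⟨hd1, hd2⟩, hm1, hm2⟩, hdm, hds⟩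
      exact ⟨⟨⟨hd1, hds⟩, hm1, hm2⟩, hdm⟩
    · rintro ⟨⟨⟨hd1, hds⟩, hm1, hm2⟩, hdm⟩
      exact ⟨⟨⟨hd1, by omega⟩, hm1, hm2⟩, hdm, hds⟩
  have e2 : ((Finset.Icc 1 P ×ˢ Finset.Icc 1 P).filter (fun p => p.1 * p.2 ≤ P)).filter (fun p => p.2 ≤ s) =
      (Finset.Icc 1 P ×ˢ Finset.Icc 1 s).filter (fun p => p.1 * p.2 ≤ P) := by
    ext ⟨d, m⟩
    simp only [Finset.filter_filter, Finset.mem_filter, Finset.mem_product, Finset.mem_Icc]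
    constructor
    · rintro ⟨⟨⟨hd1, hd2⟩, hm1, hm2⟩, hdm, hms⟩
      exact ⟨⟨⟨hd1, hd2⟩, hm1, hms⟩, hdm⟩
    · rintro ⟨⟨⟨hd1, hd2⟩, hm1, hms⟩, hdm⟩
      exact ⟨⟨⟨hd1, hd2⟩, hm1, by omega⟩, hdm, hms⟩
  have e4 : ((Finset.Icc 1 P ×ˢ Finset.Icc 1 P).filter (fun p => p.1 * p.2 ≤ P)).filter (fun p => p.2 ≤ s ∧ p.1 ≤ s) =
      Finset.Icc 1 s ×ˢ Finset.Icc 1 s := by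
    ext ⟨d, m⟩
    simp only [Finset.filter_filter, Finset.mem_filter, Finset.mem_product, Finset.mem_Icc]
    constructor
    · rintro ⟨⟨⟨hd1, hd2⟩, hm1, hm2⟩, hdm, hms, hds⟩
      exact ⟨⟨hd1, hds⟩, hm1, hms⟩
    · rintro ⟨⟨hd1, hds⟩, hm1, hms⟩
      have hmul : d * m ≤ s * s := mul_le_mul hds hms (by omega) (by omega)
      exact ⟨⟨⟨hd1, by omega⟩, hm1, by omega⟩, by linarith, hms, hds⟩
  have e3 : ((Finset.Icc 1 P ×ˢ Finset.Icc 1 P).filter (fun p => p.1 * p.2 ≤ P)).filter (fun p => p.2 ≤ s ∧ ¬ p.1 ≤ s) =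
      ((Finset.Icc 1 P ×ˢ Finset.Icc 1 P).filter (fun p => p.1 * p.2 ≤ P)).filter (fun p => ¬ p.1 ≤ s) := by
    ext ⟨d, m⟩
    simp only [Finset.filter_filter, Finset.mem_filter, Finset.mem_product, Finset.mem_Icc]
    constructor
    · rintro ⟨⟨⟨hd1, hd2⟩, hm1, hm2⟩, hdm, hms, hds⟩
      exact ⟨⟨⟨hd1, hd2⟩, hm1, hm2⟩, hdm, hds⟩
    · rintro ⟨⟨⟨hd1, hd2⟩, hm1, hm2⟩, hdm, hds⟩
      refine ⟨⟨⟨hd1, hd2⟩, hm1, hm2⟩, hdm, ?_, hds⟩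
      by_contra hms
      have h1 : s + 1 ≤ d := by omega
      have h2 : s + 1 ≤ m := by omega
      have hmul : (s + 1) * (s + 1) ≤ d * m := mul_le_mul h1 h2 (by omega) (by omega)
      linarith
  have split1 := Finset.sum_filter_add_sum_filter_not
    ((Finset.Icc 1 P ×ˢ Finset.Icc 1 P).filter (fun p => p.1 * p.2 ≤ P))
    (fun p => p.1 ≤ s) (gfun N)
  have split2 := Finset.sum_filter_add_sum_filter_not
    (((Finset.Icc 1 P ×ˢ Finset.Icc 1 P).filter (fun p => p.1 * p.2 ≤ P)).filter (fun p => p.2 ≤ s))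
    (fun p => p.1 ≤ s) (gfun N)
  have h3 : (∑ p ∈ ((((Finset.Icc 1 P ×ˢ Finset.Icc 1 P).filter (fun p => p.1 * p.2 ≤ P)).filter
        (fun p => p.2 ≤ s)).filter (fun p => ¬ p.1 ≤ s)), gfun N p) =
      ∑ p ∈ (((Finset.Icc 1 P ×ˢ Finset.Icc 1 P).filter (fun p => p.1 * p.2 ≤ P)).filter
        (fun p => ¬ p.1 ≤ s)), gfun N p := by
    rw [Finset.filter_filter, e3]
  have h4 : (∑ p ∈ ((((Finset.Icc 1 P ×ˢ Finset.Icc 1 P).filter (fun p => p.1 * p.2 ≤ P)).filter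
        (fun p => p.2 ≤ s)).filter (fun p => p.1 ≤ s)), gfun N p) =
      ∑ p ∈ Finset.Icc 1 s ×ˢ Finset.Icc 1 s, gfun N p := by
    rw [Finset.filter_filter, e4]
  rw [← e1, ← e2]
  linarith [split1, split2, h3, h4]

-- ---- identification of the two programs' totals with Dset sums ----

theorem b1Term_eq (N P d : Int) (hd : 1 ≤ d) :
    (fun d => N * PySem.Int.floordiv P d *
        (Cfun d - Cfun (d - 1)) -
      PySem.Int.floordiv (PySem.Int.floordiv P d * (PySem.Int.floordiv P d + 1)) 2 *
        (Wfun d - Wfun (d - 1))) d =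
      chi d * (N * PySem.Int.floordiv P d - d * Tv (PySem.Int.floordiv P d)) := by
  simp only []
  rw [Wdiff d hd]
  unfold chi Tv
  ring

-- ===== old A-side machinery (blocks of constant quotient, telescoping) =====

theorem b1_block_facts (P d : Int) (hd : 1 ≤ d) (hdP : d ≤ P) :
    1 ≤ PySem.Int.floordiv P d ∧
    d ≤ PySem.Int.floordiv P (PySem.Int.floordiv P d) ∧
    PySem.Int.floordiv P (PySem.Int.floordiv P d) ≤ P ∧
    (∀ e : Int, d ≤ e → e ≤ PySem.Int.floordiv P (PySem.Int.floordiv P d) →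
      PySem.Int.floordiv P e = PySem.Int.floordiv P d) := by
  have hd0 : (0:Int) < d := by omega
  have hv1 : 1 ≤ PySem.Int.floordiv P d := by
    rw [PySem.Int.le_floordiv_iff_mul_le hd0]; omega
  set v := PySem.Int.floordiv P d with hv
  have hv0 : (0:Int) < v := by omega
  have hvd : v * d ≤ P := by
    have : v ≤ PySem.Int.floordiv P d := le_of_eq hv
    rwa [PySem.Int.le_floordiv_iff_mul_le hd0] at this
  have hvd' : P < (v + 1) * d := by
    have h1 : PySem.Int.floordiv P d < v + 1 := by omega
    rwa [PySem.Int.floordiv_lt_iff_lt_mul hd0] at h1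
  have hddhi : d ≤ PySem.Int.floordiv P v := by
    rw [PySem.Int.le_floordiv_iff_mul_le hv0]
    calc d * v = v * d := by ring
    _ ≤ P := hvd
  have hdhiP : PySem.Int.floordiv P v ≤ P := by
    have h1 : PySem.Int.floordiv P v < P + 1 := by
      rw [PySem.Int.floordiv_lt_iff_lt_mul hv0]
      nlinarith
    omega
  refine ⟨hv1, hddhi, hdhiP, ?_⟩
  intro e hde hedhi
  have he0 : (0:Int) < e := by omega
  have hvle : v ≤ PySem.Int.floordiv P e := by
    rw [PySem.Int.le_floordiv_iff_mul_le he0]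
    have : e * v ≤ P := by
      have := (PySem.Int.le_floordiv_iff_mul_le hv0 (q := e) (a := P)).mp hedhi
      exact this
    linarith [this, mul_comm e v]
  have hlt : PySem.Int.floordiv P e < v + 1 := by
    rw [PySem.Int.floordiv_lt_iff_lt_mul he0]
    nlinarith
  omega

theorem b1_telescope (A k : Int) :
    ∀ (n : Nat) (a b : Int), b + 1 - a = (n : Int) → a ≤ b + 1 →
    ((PySem.List.pyRange a (b + 1) 1).map
        (fun e => A * (Cfun e - Cfun (e - 1)) - k * (Wfun e - Wfun (e - 1)))).sum =
      A * (Cfun b - Cfun (a - 1)) - k * (Wfun b - Wfun (a - 1)) := by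
  intro n
  induction n with
  | zero =>
    intro a b hn _
    have hba : b + 1 ≤ a := by omega
    rw [PySem.List.pyRange_one_eq_nil hba]
    have hab : a - 1 = b := by omega
    simp [hab]
  | succ m ih =>
    intro a b hn hab
    have hab' : a ≤ b := by omega
    rw [PySem.List.pyRange_one_succ_right hab']
    rw [List.map_append, List.sum_append]
    rcases Nat.eq_zero_or_pos m with hm | hm
    · have hab2 : a = b := by omega
      have : b ≤ a := by omega
      rw [PySem.List.pyRange_one_eq_nil this, hab2]
      simp
    · have := ih a (b - 1) (by omega) (by omega)
      rw [show b - 1 + 1 = b by ring] at this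
      rw [this]
      simp only [List.map_cons, List.map_nil, List.sum_cons, List.sum_nil]
      ring

-- the per-d term A's blocks accumulate
def b1Term (N P d : Int) : Int :=
  let v := PySem.Int.floordiv P d
  N * v * (Cfun d - Cfun (d - 1)) -
    PySem.Int.floordiv (v * (v + 1)) 2 * (Wfun d - Wfun (d - 1))

theorem b1Loop_eq_sum (N P : Int) :
    ∀ (fuel : Nat) (d total : Int), 1 ≤ d → d ≤ P + 1 → (P + 1 - d).toNat < fuel →
    b1Loop N P fuel total d =
      total + ((PySem.List.pyRange d (P + 1) 1).map (b1Term N P)).sum := by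
  intro fuel
  induction fuel with
  | zero => intro d total _ _ h; omega
  | succ m ih =>
    intro d total hd hdP hfuel
    by_cases hle : d ≤ P
    · obtain ⟨hv1, hddhi, hdhiP, hconst⟩ := b1_block_facts P d hd hle
      set v := PySem.Int.floordiv P d with hv
      set dhi := PySem.Int.floordiv P v with hdhi
      have step : b1Loop N P (m + 1) total d =
          b1Loop N P m
            (total + (N * v * (Cfun dhi - Cfun (d - 1)) -
              PySem.Int.floordiv (v * (v + 1)) 2 * (Wfun dhi - Wfun (d - 1))))
            (dhi + 1) := by
        simp only [b1Loop, if_pos hle, ← hv, ← hdhi]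
      rw [step, ih (dhi + 1) _ (by omega) (by omega) (by omega)]
      rw [PySem.List.pyRange_one_append d (dhi + 1) (P + 1) (by omega) (by omega),
        List.map_append, List.sum_append]
      have hmapeq : (PySem.List.pyRange d (dhi + 1) 1).map (b1Term N P) =
          (PySem.List.pyRange d (dhi + 1) 1).map
            (fun e => (N * v) * (Cfun e - Cfun (e - 1)) -
              PySem.Int.floordiv (v * (v + 1)) 2 * (Wfun e - Wfun (e - 1))) := by
        apply List.map_congr_left
        intro e he
        rw [PySem.List.mem_pyRange_one] at he
        unfold b1Term
        rw [hconst e he.1 (by omega)]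
      rw [hmapeq, b1_telescope (N * v) (PySem.Int.floordiv (v * (v + 1)) 2)
        (dhi + 1 - d).toNat d dhi (by omega) (by omega)]
      ring
    · have hnil : PySem.List.pyRange d (P + 1) 1 = [] :=
        PySem.List.pyRange_one_eq_nil (by omega)
      simp only [b1Loop, if_neg hle, hnil, List.map_nil, List.sum_nil, add_zero]

-- A's total is the sum of gfun over the hyperbola region
theorem A_total (N P : Int) (hP : 1 ≤ P) :
    ((PySem.List.pyRange 1 (P + 1) 1).map (b1Term N P)).sum = ∑ p ∈ (Finset.Icc 1 P ×ˢ Finset.Icc 1 P).filter (fun p => p.1 * p.2 ≤ P), gfun N p := by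
  rw [pyRangeSumIcc (b1Term N P) P.toNat 1 P (by omega) (by omega)]
  have h1 : (∑ d ∈ Finset.Icc 1 P, b1Term N P d) =
      ∑ d ∈ Finset.Icc 1 P,
        chi d * (N * PySem.Int.floordiv P d - d * Tv (PySem.Int.floordiv P d)) := by
    refine Finset.sum_congr rfl ?_
    intro d hd
    rw [Finset.mem_Icc] at hd
    have := b1Term_eq N P d hd.1
    simpa [b1Term] using this
  rw [h1, ← rowSum N P P (by omega) (by omega) (by omega)]

-- ---- the integer-sqrt loop of B ----

theorem isqrtLoop_facts (P : Int) (hP : 1 ≤ P) :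
    ∀ (fuel : Nat) (s : Int), 1 ≤ s → s * s ≤ P → P.toNat < fuel + s.toNat →
    1 ≤ isqrtLoop P fuel s ∧ isqrtLoop P fuel s * isqrtLoop P fuel s ≤ P ∧
      P < (isqrtLoop P fuel s + 1) * (isqrtLoop P fuel s + 1) := by
  intro fuel
  induction fuel with
  | zero =>
    intro s hs1 hs2 hfuel
    exfalso
    have : s ≤ s * s := by nlinarith
    omega
  | succ m ih =>
    intro s hs1 hs2 hfuel
    by_cases h : (s + 1) * (s + 1) ≤ P
    · have := ih (s + 1) (by omega) h (by omega)
      simpa [isqrtLoop, if_pos h] using this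
    · simp only [isqrtLoop, if_neg h]
      exact ⟨hs1, hs2, by omega⟩

-- ===== VERDICT (by name: the statement is the Claim_ definition above) =====
theorem b1_sqrt_spec : Claim_equal_b1_sqrt := by
  intro N _
  unfold Spec_b1_sqrt b1_sqrt b1_sqrt_alt
  by_cases h : N ≤ 1
  · simp [h]
  · simp only [if_neg h]
    have hP : 1 ≤ N - 1 := by omega
    set P := N - 1 with hPdef
    set s := isqrtLoop P P.toNat 1 with hs
    obtain ⟨hs1, hs2, hs3⟩ := isqrtLoop_facts P hP P.toNat 1 (by omega) (by nlinarith) (by omega)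
    rw [← hs] at hs1 hs2 hs3
    have hsP : s ≤ P := by nlinarith
    -- A side
    rw [b1Loop_eq_sum N P (P.toNat + 1) 1 0 (by omega) (by omega) (by omega),
      A_total N P hP, hyperbola N P s hs1 hs2 hs3]
    -- B side
    rw [PySem.List.foldl_add, PySem.List.foldl_add,
      pyRangeSumIcc (b1TermD N P) s.toNat 1 s (by omega) (by omega),
      pyRangeSumIcc (b1TermM N P) s.toNat 1 s (by omega) (by omega)]
    -- identify the three pieces
    have hrow : (∑ p ∈ (Finset.Icc 1 s ×ˢ Finset.Icc 1 P).filter (fun p => p.1 * p.2 ≤ P),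
        gfun N p) = ∑ d ∈ Finset.Icc 1 s, b1TermD N P d := by
      rw [rowSum N P s (by omega) hsP (by omega)]
      refine Finset.sum_congr rfl ?_
      intro d hd
      simp only [b1TermD, chi, Tv]
    have hcol : (∑ p ∈ (Finset.Icc 1 P ×ˢ Finset.Icc 1 s).filter (fun p => p.1 * p.2 ≤ P),
        gfun N p) = ∑ m ∈ Finset.Icc 1 s, b1TermM N P m := by
      rw [colSum N P s (by omega) hsP (by omega)]
      refine Finset.sum_congr rfl ?_
      intro m hm
      simp only [b1TermM]
    have hcross : (∑ p ∈ Finset.Icc 1 s ×ˢ Finset.Icc 1 s, gfun N p) =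
        N * s * Cfun s - PySem.Int.floordiv (s * (s + 1)) 2 * Wfun s := by
      rw [Finset.sum_product]
      have hinner : ∀ d ∈ Finset.Icc 1 s, (∑ m ∈ Finset.Icc 1 s, gfun N (d, m)) =
          chi d * (N * s - d * Tv s) := by
        intro d _
        exact innerBlock N d s (by omega)
      rw [Finset.sum_congr rfl hinner, colBlock (N * s) (Tv s) s (by omega)]
      unfold Tv
      ring
    rw [hrow, hcol, hcross]
    ring
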